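-- pv_equiv track=rewrite | github.com/Harrisfactory/advent-of-code-2023 | d1.py | parseNums
-- ===== SOURCE A (Python) =====
-- def parseNums(lines):
-- 	results = []
-- 	for i in range(len(lines)):
-- 		cur_line = lines[i]
-- 		left, right = 0, len(cur_line)-1
-- 		while left <= right:
-- 			if cur_line[left].isnumeric() and cur_line[right].isnumeric():
-- 				s_nums = str(cur_line[left] + cur_line[right])
-- 				i_nums = int(s_nums)
-- 				results.append(i_nums)
-- 				break
-- 			if not cur_line[left].isnumeric():
-- 				left+=1
-- 			if not cur_line[right].isnumeric():
-- 				right-=1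
-- 	return results
-- ===== SOURCE B (Python) =====
-- def parseNums(lines):
--     results = []
--     for line in lines:
--         digits = [c for c in line if c.isnumeric()]
--         if digits:
--             results.append(int(digits[0] + digits[-1]))
--     return results
-- ===== Notes on version B (the rewrite author's own statement) =====
-- stated objective: simpler
-- what changed: Replaced A's two converging pointers with early-stop and per-step index tests by a single forward pass that filters the digit characters of each line and combines the first and last of them.
import Mathlib
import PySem

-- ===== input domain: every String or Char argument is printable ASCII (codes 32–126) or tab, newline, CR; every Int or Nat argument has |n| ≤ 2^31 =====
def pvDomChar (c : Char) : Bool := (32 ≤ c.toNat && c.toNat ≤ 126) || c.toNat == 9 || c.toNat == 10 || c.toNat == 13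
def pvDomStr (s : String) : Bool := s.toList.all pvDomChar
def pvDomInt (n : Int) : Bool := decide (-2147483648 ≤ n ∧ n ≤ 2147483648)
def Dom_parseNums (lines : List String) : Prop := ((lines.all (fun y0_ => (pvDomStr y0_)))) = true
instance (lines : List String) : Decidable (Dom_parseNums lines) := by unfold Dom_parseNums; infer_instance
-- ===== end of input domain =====

-- B replaces A's two converging pointers by one forward digit-filter pass per line (objective: simpler).
-- On the printable-ASCII domain Python's str.isnumeric coincides with PySem.Chars.isdigit (exact there).
-- Python's int(c1 + c2) on the two found digit characters, as written in both sources: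
def pvMkNum (c d : Char) : Int := (PySem.Int.ofChars? [c, d]).getD 0

-- ===== PORT A =====
-- the `while left <= right` loop; each non-breaking iteration moves a pointer, so the
-- iteration count is at most cs.length, which parseNums passes as fuel.
def pvLoopA (cs : List Char) (l r : Int) : Nat → Option Int
  | 0 => none
  | fuel + 1 =>
    if l ≤ r then
      match PySem.List.pyGet? cs l, PySem.List.pyGet? cs r with
      | some cl, some cr =>
        if PySem.Chars.isdigit cl && PySem.Chars.isdigit cr then
          some (pvMkNum cl cr)
        else
          pvLoopA cs (if !PySem.Chars.isdigit cl then l + 1 else l)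
                     (if !PySem.Chars.isdigit cr then r - 1 else r) fuel
      | _, _ => none   -- IndexError; never reached (0 ≤ l ≤ r < length)
    else none

def parseNums (lines : List String) : List Int :=
  lines.foldl (fun results line =>
    match pvLoopA line.toList 0 ((line.toList.length : Int) - 1) line.toList.length with
    | some v => results ++ [v]
    | none => results) []

-- ===== PORT B =====
def parseNums_alt (lines : List String) : List Int :=
  lines.foldl (fun results line =>
    match line.toList.filter PySem.Chars.isdigit with
    | [] => results
    | d :: rest => results ++ [pvMkNum d ((d :: rest).getLastD d)]) []

-- ===== PRECONDITION & SPEC =====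
def Spec_parseNums (lines : List String) (out : List Int) : Prop := out = parseNums_alt lines
instance (lines : List String) (out : List Int) : Decidable (Spec_parseNums lines out) := by unfold Spec_parseNums; infer_instance

-- ===== CLAIM (what is proved, stated in full; the proofs are below) =====
def Claim_equal_parseNums : Prop := ∀ (lines : List String), Dom_parseNums lines → Spec_parseNums lines (parseNums lines)

-- ===== LEMMAS AND PROOFS =====

-- what B computes from the filtered digit list, as an Option
def pvFirstLast (ds : List Char) : Option Int :=
  match ds with
  | [] => none
  | d :: rest => some (pvMkNum d ((d :: rest).getLastD d))

lemma pvFirstLast_spec {a b : Char} (ds : List Char) (hh : ds.head? = some a) (hl : ds.getLast? = some b) :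
    pvFirstLast ds = some (pvMkNum a b) := by
  cases ds with
  | nil => simp at hh
  | cons d rest =>
    have ha : d = a := by simpa using hh
    subst ha
    simp [pvFirstLast, List.getLastD_eq_getLast?, hl]

lemma pvFilter_covered (cs : List Char) (ln rn : Nat) (hlr : rn + 1 ≤ ln)
    (hpre : ((cs.take ln).all (fun c => !PySem.Chars.isdigit c)) = true)
    (hsuf : ((cs.drop (rn + 1)).all (fun c => !PySem.Chars.isdigit c)) = true) :
    cs.filter PySem.Chars.isdigit = [] := by
  rw [List.filter_eq_nil_iff]
  intro c hc
  have hmem : c ∈ cs.take ln ++ cs.drop ln := by rw [List.take_append_drop]; exact hc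
  rcases List.mem_append.mp hmem with h1 | h2
  · simpa using List.all_eq_true.mp hpre c h1
  · have hd : cs.drop ln = List.drop (ln - (rn + 1)) (cs.drop (rn + 1)) := by
      rw [List.drop_drop]; congr 1; omega
    rw [hd] at h2
    simpa using List.all_eq_true.mp hsuf c (List.mem_of_mem_drop h2)

lemma pvLoopA_eq (cs : List Char) : ∀ (fuel ln rn : Nat), rn < cs.length →
    rn + 1 - ln ≤ fuel →
    ((cs.take ln).all (fun c => !PySem.Chars.isdigit c)) = true →
    ((cs.drop (rn + 1)).all (fun c => !PySem.Chars.isdigit c)) = true →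
    pvLoopA cs (ln : Int) (rn : Int) fuel = pvFirstLast (cs.filter PySem.Chars.isdigit) := by
  intro fuel
  induction fuel with
  | zero =>
    intro ln rn hr hf hpre hsuf
    rw [pvFilter_covered cs ln rn (by omega) hpre hsuf]
    simp [pvLoopA, pvFirstLast]
  | succ fuel ih =>
    intro ln rn hr hf hpre hsuf
    by_cases hlr : ln ≤ rn
    · have hln : ln < cs.length := by omega
      have hle : (ln : Int) ≤ (rn : Int) := by exact_mod_cast hlr
      have hgl : PySem.List.pyGet? cs (ln : Int) = some cs[ln] := by simp [hln]
      have hgr : PySem.List.pyGet? cs (rn : Int) = some cs[rn] := by simp [hr]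
      have hstep : ∀ o : Option Int,
          (match PySem.List.pyGet? cs (ln : Int), PySem.List.pyGet? cs (rn : Int) with
            | some cl, some cr =>
              if PySem.Chars.isdigit cl && PySem.Chars.isdigit cr then
                some (pvMkNum cl cr)
              else
                pvLoopA cs (if !PySem.Chars.isdigit cl then (ln : Int) + 1 else (ln : Int))
                           (if !PySem.Chars.isdigit cr then (rn : Int) - 1 else (rn : Int)) fuel
            | _, _ => none) = o →
          pvLoopA cs (ln : Int) (rn : Int) (fuel + 1) = o := by
        intro o ho
        simp only [pvLoopA, if_pos hle]
        exact ho
      have hpnil : (cs.take ln).filter PySem.Chars.isdigit = [] :=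
        List.filter_eq_nil_iff.mpr (fun c hc => by simpa using List.all_eq_true.mp hpre c hc)
      have hsnil : (cs.drop (rn + 1)).filter PySem.Chars.isdigit = [] :=
        List.filter_eq_nil_iff.mpr (fun c hc => by simpa using List.all_eq_true.mp hsuf c hc)
      have hfilter_drop : cs.filter PySem.Chars.isdigit = (cs.drop ln).filter PySem.Chars.isdigit := by
        conv_lhs => rw [← List.take_append_drop ln cs]
        rw [List.filter_append, hpnil, List.nil_append]
      have htake1 : cs.take (rn + 1) = cs.take rn ++ [cs[rn]] := by
        rw [List.take_add_one, List.getElem?_eq_getElem hr]; rfl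
      have hfilter_take : cs.filter PySem.Chars.isdigit = (cs.take (rn + 1)).filter PySem.Chars.isdigit := by
        conv_lhs => rw [← List.take_append_drop (rn + 1) cs]
        rw [List.filter_append, hsnil, List.append_nil]
      have hdropln : cs.drop ln = cs[ln] :: cs.drop (ln + 1) := List.drop_eq_getElem_cons hln
      have hdroprn : cs.drop rn = cs[rn] :: cs.drop (rn + 1) := List.drop_eq_getElem_cons hr
      by_cases hdl : PySem.Chars.isdigit cs[ln]
      · by_cases hdr : PySem.Chars.isdigit cs[rn]
        · -- break: first digit is cs[ln], last digit is cs[rn]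
          have h1 : cs.filter PySem.Chars.isdigit = cs[ln] :: (cs.drop (ln + 1)).filter PySem.Chars.isdigit := by
            rw [hfilter_drop, hdropln, List.filter_cons, if_pos hdl]
          have h2 : cs.filter PySem.Chars.isdigit = (cs.take rn).filter PySem.Chars.isdigit ++ [cs[rn]] := by
            rw [hfilter_take, htake1, List.filter_append]
            congr 1
            simp [hdr]
          have hhead : (cs.filter PySem.Chars.isdigit).head? = some cs[ln] := by
            rw [h1]; rfl
          have hlast : (cs.filter PySem.Chars.isdigit).getLast? = some cs[rn] := by
            rw [h2, List.getLast?_concat]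
          rw [pvFirstLast_spec _ hhead hlast]
          apply hstep
          rw [hgl, hgr]
          simp [hdl, hdr]
        · -- right pointer moves; rn = 0 is impossible here
          have hrn : 1 ≤ rn := by
            by_contra h0
            have h0' : rn = 0 := by omega
            have hln0 : ln = 0 := by omega
            subst h0'
            subst hln0
            exact hdr hdl
          have hsuf' : ((cs.drop ((rn - 1) + 1)).all (fun c => !PySem.Chars.isdigit c)) = true := by
            rw [Nat.sub_add_cancel hrn, hdroprn, List.all_cons]
            simp [hsuf, hdr]
          apply hstep
          rw [hgl, hgr]
          simp only [hdl, hdr, Bool.and_false, Bool.false_eq_true, if_false, Bool.not_true,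
            Bool.not_false, if_true]
          have hcast : (rn : Int) - 1 = ((rn - 1 : Nat) : Int) := by omega
          rw [hcast]
          exact ih ln (rn - 1) (by omega) (by omega) hpre hsuf'
      · -- left pointer moves (right may move too)
        have htakel : cs.take (ln + 1) = cs.take ln ++ [cs[ln]] := by
          rw [List.take_add_one, List.getElem?_eq_getElem hln]; rfl
        have hpre' : ((cs.take (ln + 1)).all (fun c => !PySem.Chars.isdigit c)) = true := by
          rw [htakel, List.all_append]
          simp [hpre, hdl]
        have hcastl : (ln : Int) + 1 = ((ln + 1 : Nat) : Int) := by omega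
        by_cases hdr : PySem.Chars.isdigit cs[rn]
        · apply hstep
          rw [hgl, hgr]
          simp only [hdl, hdr, Bool.false_and, Bool.false_eq_true, if_false,
            Bool.not_false, if_true]
          rw [hcastl]
          exact ih (ln + 1) rn hr (by omega) hpre' hsuf
        · rcases Nat.eq_zero_or_pos rn with h0 | hrn
          · -- whole line covered and nondigit: both sides give none
            have hln0 : ln = 0 := by omega
            have ht0 : cs.take rn = [] := by rw [h0]; exact List.take_zero
            have hfe : cs.filter PySem.Chars.isdigit = [] := by
              rw [hfilter_take, htake1, List.filter_append, ht0]
              simp [hdr]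
            rw [hfe]
            apply hstep
            rw [hgl, hgr]
            simp only [hdl, hdr, Bool.false_and, Bool.false_eq_true, if_false,
              Bool.not_false, if_true]
            -- new pointers: l' = ln+1 ≥ 1, r' = rn-1 = -1 < l', so the loop exits with none
            cases fuel with
            | zero => simp [pvLoopA, pvFirstLast]
            | succ f =>
              have : ¬ ((ln : Int) + 1 ≤ (rn : Int) - 1) := by omega
              simp [pvLoopA, pvFirstLast, this]
          · have hsuf' : ((cs.drop ((rn - 1) + 1)).all (fun c => !PySem.Chars.isdigit c)) = true := by
              rw [Nat.sub_add_cancel hrn, hdroprn, List.all_cons]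
              simp [hsuf, hdr]
            have hcastr : (rn : Int) - 1 = ((rn - 1 : Nat) : Int) := by omega
            apply hstep
            rw [hgl, hgr]
            simp only [hdl, hdr, Bool.false_and, Bool.false_eq_true, if_false,
              Bool.not_false, if_true]
            rw [hcastl, hcastr]
            exact ih (ln + 1) (rn - 1) (by omega) (by omega) hpre' hsuf'
    · -- ln > rn: loop exits; the whole list is covered, so the filter is empty
      rw [pvFilter_covered cs ln rn (by omega) hpre hsuf]
      have hne : ¬ ((ln : Int) ≤ (rn : Int)) := by exact_mod_cast hlr
      simp only [pvLoopA, if_neg hne, pvFirstLast]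

lemma pvLoopA_line (cs : List Char) :
    pvLoopA cs 0 ((cs.length : Int) - 1) cs.length = pvFirstLast (cs.filter PySem.Chars.isdigit) := by
  cases cs with
  | nil => simp [pvLoopA, pvFirstLast]
  | cons c rest =>
    have hlen : 1 ≤ (c :: rest).length := by simp
    have hcast : (((c :: rest).length : Int)) - 1 = (((c :: rest).length - 1 : Nat) : Int) := by
      omega
    have h0 : (0 : Int) = ((0 : Nat) : Int) := rfl
    rw [hcast, h0]
    exact pvLoopA_eq (c :: rest) ((c :: rest).length) 0 ((c :: rest).length - 1)
      (by simp) (by omega) (by simp) (by simp)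

theorem parseNums_spec : Claim_equal_parseNums := by
  intro lines _
  unfold Spec_parseNums parseNums parseNums_alt
  congr 1
  funext results line
  rw [pvLoopA_line]
  cases h : line.toList.filter PySem.Chars.isdigit with
  | nil => simp [pvFirstLast]
  | cons d rest => simp [pvFirstLast]
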